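-- pv_equiv track=rewrite | github.com/tea9296/CABAC | encode.py | readProb10bits
-- ===== SOURCE A (Python) =====
-- def readProb10bits(bins):
--     x = 0
--     count = 1
--     numb = 10
--     #if len(bins) <numb:
--     #    bitsNum = len(bins)
--     #else:
--     #    bitsNum = numb
--     while len(bins) < numb:
--         bins.append(0)
--
--     for i in range(numb):
--
--         x = x + bins[numb-i-1]*count
--         count *= 2
--     return x, numb
-- ===== SOURCE B (Python) =====
-- def readProb10bits(bins):
--     # same in-place padding as the original (mutation preserved)
--     while len(bins) < 10:
--         bins.append(0)
--     x = 0
--     for b in bins[:10]:  # Horner's method, scanning forward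
--         x = x * 2 + b
--     return x, 10
-- ===== Notes on version B (the rewrite author's own statement) =====
-- stated objective: idiomatic
-- what changed: Replaces the backward place-value loop (doubling weight 'count', indexing bins[9-i]) with a forward Horner scan over bins[:10] (x = x*2 + b), no counter and no indexing; the in-place padding loop is kept.
import Mathlib
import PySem

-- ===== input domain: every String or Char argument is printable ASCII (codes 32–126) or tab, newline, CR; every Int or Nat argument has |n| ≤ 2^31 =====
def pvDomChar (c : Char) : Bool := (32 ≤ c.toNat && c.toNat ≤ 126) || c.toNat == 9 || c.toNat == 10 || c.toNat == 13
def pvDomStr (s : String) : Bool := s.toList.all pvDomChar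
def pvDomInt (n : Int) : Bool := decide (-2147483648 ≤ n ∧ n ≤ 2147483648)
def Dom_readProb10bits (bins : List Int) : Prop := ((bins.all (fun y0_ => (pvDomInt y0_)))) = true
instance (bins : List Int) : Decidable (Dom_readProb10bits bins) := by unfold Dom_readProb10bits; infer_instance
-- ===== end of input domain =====

-- B replaces A's backward place-value loop (doubling count, indexing bins[9-i]) with a
-- forward Horner scan over bins[:10]; same in-place padding loop; return value proved equal.

-- ===== PORT A =====
-- the while-append padding loop appends 0 exactly (10 - len bins) times
def readProb10bits (bins : List Int) : Int × Int :=
  let padded := bins ++ List.replicate (10 - bins.length) 0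
  -- for i in range(10): x += padded[10-i-1]*count; count *= 2
  -- (the index 10-i-1 is always in range, so pyGetD with default 0 is exact)
  let r := (PySem.List.pyRange 0 10 1).foldl
    (fun (p : Int × Int) i => (p.1 + PySem.List.pyGetD padded (10 - i - 1) 0 * p.2, p.2 * 2)) (0, 1)
  (r.1, 10)

-- ===== PORT B =====
def readProb10bits_alt (bins : List Int) : Int × Int :=
  let padded := bins ++ List.replicate (10 - bins.length) 0
  ((PySem.List.slice padded none (some 10)).foldl (fun x b => x * 2 + b) 0, 10)

-- ===== PRECONDITION & SPEC =====
def Spec_readProb10bits (bins : List Int) (out : Int × Int) : Prop := out = readProb10bits_alt bins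
instance (bins : List Int) (out : Int × Int) : Decidable (Spec_readProb10bits bins out) := by unfold Spec_readProb10bits; infer_instance

-- ===== CLAIM (what is proved, stated in full; the proofs are below) =====
def Claim_equal_readProb10bits : Prop := ∀ (bins : List Int), Dom_readProb10bits bins → Spec_readProb10bits bins (readProb10bits bins)

-- ===== LEMMAS AND PROOFS =====

-- both loops, on any list of length exactly 10, compute the same integer
theorem pv_core (l : List Int) (h : l.length = 10) :
    ((PySem.List.pyRange 0 10 1).foldl
      (fun (p : Int × Int) i => (p.1 + PySem.List.pyGetD l (10 - i - 1) 0 * p.2, p.2 * 2)) (0, 1)).1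
    = l.foldl (fun x b => x * 2 + b) 0 := by
  match l, h with
  | [a,b,c,d,e,f,g,h,i,j], _ =>
    simp [PySem.List.pyRange, PySem.List.pyGetD, PySem.List.pyGet?, PySem.List.pyIdx?,
      List.range_succ, List.foldl]
    ring

theorem readProb10bits_spec : Claim_equal_readProb10bits := by
  intro bins _
  unfold Spec_readProb10bits readProb10bits readProb10bits_alt
  dsimp only
  have hlen : (bins ++ List.replicate (10 - bins.length) 0).length = max bins.length 10 := by
    simp; omega
  have hslice : ∀ (l : List Int), PySem.List.slice l none (some 10) = l.take 10 := by
    intro l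
    have : ((10 : Nat) : Int) = (10 : Int) := by norm_num
    rw [← this, PySem.List.slice_to_natCast]
  by_cases hb : bins.length ≤ 10
  · have h10 : (bins ++ List.replicate (10 - bins.length) 0).length = 10 := by omega
    have := pv_core _ h10
    rw [hslice, List.take_of_length_le (by omega)]
    simpa using this
  · -- bins already has length ≥ 10: padding is empty, slice takes the first 10
    have hpad : bins ++ List.replicate (10 - bins.length) 0 = bins := by
      have : 10 - bins.length = 0 := by omega
      simp [this]
    rw [hpad, hslice]
    have hk : (bins.take 10).length = 10 := by simp; omega
    have hcore := pv_core (bins.take 10) hk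
    rw [← hcore]
    -- the A-side loop only reads indices below 10, identical on bins and bins.take 10
    have := PySem.List.foldl_congr_mem
      (l := PySem.List.pyRange 0 10 1) (init := ((0 : Int), (1 : Int)))
      (f := fun (p : Int × Int) i => (p.1 + PySem.List.pyGetD bins (10 - i - 1) 0 * p.2, p.2 * 2))
      (g := fun (p : Int × Int) i => (p.1 + PySem.List.pyGetD (bins.take 10) (10 - i - 1) 0 * p.2, p.2 * 2))
      (by
        intro acc i hi
        rw [PySem.List.mem_pyRange_one] at hi
        have h1 : (0:Int) ≤ 10 - i - 1 := by omega
        have h2 : 10 - i - 1 < (bins.length : Int) := by omega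
        have h3 : 10 - i - 1 < ((bins.take 10).length : Int) := by rw [hk]; omega
        dsimp only
        rw [PySem.List.pyGetD_eq_getElem _ _ h1 h2, PySem.List.pyGetD_eq_getElem _ _ h1 h3]
        rw [List.getElem_take])
    rw [this]

-- ===== VERDICT above: readProb10bits_spec proves Claim_equal_readProb10bits =====
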